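-- pv_equiv track=rewrite | github.com/oferas-a11y/TestPhotos | main_app/data_search_dashord/search.py | compute_category_counts
-- ===== SOURCE A (Python) =====
-- from typing import Dict, List
--
-- def compute_category_counts(idx: Dict[str, Dict[str, str]]) -> Dict[str, int]:
--     counts = {
--         "nazi_symbols": 0,
--         "jewish_symbols": 0,
--         "hebrew_text": 0,
--         "german_text": 0,
--         "violence": 0,
--         "indoor": 0,
--         "outdoor": 0,
--     }
--     for _, row in idx.items():
--         if (row.get("llm_nazi_symbols") or "").strip():
--             counts["nazi_symbols"] += 1
--         if (row.get("llm_jewish_symbols") or "").strip():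
--             counts["jewish_symbols"] += 1
--         if row.get("hebrew_present", "").lower() == "true":
--             counts["hebrew_text"] += 1
--         if row.get("german_present", "").lower() == "true":
--             counts["german_text"] += 1
--         if row.get("violence", "").lower() == "true":
--             counts["violence"] += 1
--         io = (row.get("indoor_outdoor") or "").lower()
--         if io == "indoor":
--             counts["indoor"] += 1
--         elif io == "outdoor":
--             counts["outdoor"] += 1
--     return counts
-- ===== SOURCE B (Python) =====
-- from typing import Dict, List
--
-- def compute_category_counts(idx: Dict[str, Dict[str, str]]) -> Dict[str, int]:
--     # Seven independent aggregations over the rows instead of one combined loop.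
--     rows = list(idx.values())
--
--     def filled(field):
--         return sum(1 for r in rows if (r.get(field) or "").strip())
--
--     def flagged(field):
--         return sum(1 for r in rows if r.get(field, "").lower() == "true")
--
--     io = [(r.get("indoor_outdoor") or "").lower() for r in rows]
--     return {
--         "nazi_symbols": filled("llm_nazi_symbols"),
--         "jewish_symbols": filled("llm_jewish_symbols"),
--         "hebrew_text": flagged("hebrew_present"),
--         "german_text": flagged("german_present"),
--         "violence": flagged("violence"),
--         "indoor": io.count("indoor"),
--         "outdoor": io.count("outdoor"),
--     }
-- ===== Notes on version B (the rewrite author's own statement) =====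
-- stated objective: alternative
-- what changed: Replaces A's single fold that threads a mutable 7-key counts dict through every row with seven independent per-category aggregations (sums/list.count) over the rows, assembled into a dict literal; the indoor/outdoor elif becomes two independent counts over the lowered field values.
import Mathlib
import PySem

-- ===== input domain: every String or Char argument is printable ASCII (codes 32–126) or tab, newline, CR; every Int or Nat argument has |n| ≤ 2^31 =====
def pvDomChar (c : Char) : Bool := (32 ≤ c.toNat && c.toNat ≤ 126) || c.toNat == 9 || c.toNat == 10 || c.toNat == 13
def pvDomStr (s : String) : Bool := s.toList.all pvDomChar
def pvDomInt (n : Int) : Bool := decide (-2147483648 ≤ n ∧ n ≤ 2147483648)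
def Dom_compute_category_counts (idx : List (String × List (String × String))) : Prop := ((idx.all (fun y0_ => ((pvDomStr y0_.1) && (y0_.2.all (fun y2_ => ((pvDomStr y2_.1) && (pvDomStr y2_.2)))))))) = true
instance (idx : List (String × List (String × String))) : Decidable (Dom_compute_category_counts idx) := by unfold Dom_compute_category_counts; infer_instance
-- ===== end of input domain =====

-- B replaces A's single row loop threading a 7-key counts dict with seven independent
-- per-category aggregations over the rows (alternative decomposition; same cost).

-- ===== PORT A =====
-- counts is the dict {category: int}; its keys are the seven fixed literals, so
-- `counts[k] += 1` is an in-place overwrite, rendered as a map over the assoc list.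
def pvBump (counts : List (String × Int)) (k : String) : List (String × Int) :=
  counts.map (fun p => if p.1 == k then (p.1, p.2 + 1) else p)

-- one body of A's `for _, row in idx.items()` loop
def pvStepA (counts : List (String × Int)) (row : List (String × String)) : List (String × Int) :=
  let counts := if (PySem.Str.strip ((row.lookup "llm_nazi_symbols").getD "")) ≠ "" then pvBump counts "nazi_symbols" else counts
  let counts := if (PySem.Str.strip ((row.lookup "llm_jewish_symbols").getD "")) ≠ "" then pvBump counts "jewish_symbols" else counts
  let counts := if PySem.Str.lower ((row.lookup "hebrew_present").getD "") = "true" then pvBump counts "hebrew_text" else counts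
  let counts := if PySem.Str.lower ((row.lookup "german_present").getD "") = "true" then pvBump counts "german_text" else counts
  let counts := if PySem.Str.lower ((row.lookup "violence").getD "") = "true" then pvBump counts "violence" else counts
  let io := PySem.Str.lower ((row.lookup "indoor_outdoor").getD "")
  if io = "indoor" then pvBump counts "indoor"
  else if io = "outdoor" then pvBump counts "outdoor"
  else counts

def compute_category_counts (idx : List (String × List (String × String))) : List (String × Int) :=
  idx.foldl (fun counts p => pvStepA counts p.2)
    [("nazi_symbols", 0), ("jewish_symbols", 0), ("hebrew_text", 0), ("german_text", 0),
     ("violence", 0), ("indoor", 0), ("outdoor", 0)]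

-- ===== PORT B =====
-- sum(1 for r in rows if (r.get(field) or "").strip())
def pvFilled (rows : List (List (String × String))) (field : String) : Int :=
  (rows.countP (fun r => decide ((PySem.Str.strip ((r.lookup field).getD "")) ≠ "")) : Int)

-- sum(1 for r in rows if r.get(field, "").lower() == "true")
def pvFlagged (rows : List (List (String × String))) (field : String) : Int :=
  (rows.countP (fun r => decide (PySem.Str.lower ((r.lookup field).getD "") = "true")) : Int)

def compute_category_counts_alt (idx : List (String × List (String × String))) : List (String × Int) :=
  let rows := idx.map (·.2)
  let io := rows.map (fun r => PySem.Str.lower ((r.lookup "indoor_outdoor").getD ""))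
  [("nazi_symbols", pvFilled rows "llm_nazi_symbols"),
   ("jewish_symbols", pvFilled rows "llm_jewish_symbols"),
   ("hebrew_text", pvFlagged rows "hebrew_present"),
   ("german_text", pvFlagged rows "german_present"),
   ("violence", pvFlagged rows "violence"),
   ("indoor", (io.count "indoor" : Int)),
   ("outdoor", (io.count "outdoor" : Int))]

-- ===== PRECONDITION & SPEC =====
def Spec_compute_category_counts (idx : List (String × List (String × String))) (out : List (String × Int)) : Prop := out = compute_category_counts_alt idx
instance (idx : List (String × List (String × String))) (out : List (String × Int)) : Decidable (Spec_compute_category_counts idx out) := by unfold Spec_compute_category_counts; infer_instance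

-- ===== CLAIM (what is proved, stated in full; the proofs are below) =====
def Claim_equal_compute_category_counts : Prop := ∀ (idx : List (String × List (String × String))), Dom_compute_category_counts idx → Spec_compute_category_counts idx (compute_category_counts idx)

-- ===== LEMMAS AND PROOFS =====
def pvMk (a b c d e f g : Int) : List (String × Int) :=
  [("nazi_symbols", a), ("jewish_symbols", b), ("hebrew_text", c), ("german_text", d),
   ("violence", e), ("indoor", f), ("outdoor", g)]

lemma pvBump_nazi (a b c d e f g : Int) : pvBump (pvMk a b c d e f g) "nazi_symbols" = pvMk (a+1) b c d e f g := by simp [pvBump, pvMk]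
lemma pvBump_jewish (a b c d e f g : Int) : pvBump (pvMk a b c d e f g) "jewish_symbols" = pvMk a (b+1) c d e f g := by simp [pvBump, pvMk]
lemma pvBump_hebrew (a b c d e f g : Int) : pvBump (pvMk a b c d e f g) "hebrew_text" = pvMk a b (c+1) d e f g := by simp [pvBump, pvMk]
lemma pvBump_german (a b c d e f g : Int) : pvBump (pvMk a b c d e f g) "german_text" = pvMk a b c (d+1) e f g := by simp [pvBump, pvMk]
lemma pvBump_violence (a b c d e f g : Int) : pvBump (pvMk a b c d e f g) "violence" = pvMk a b c d (e+1) f g := by simp [pvBump, pvMk]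
lemma pvBump_indoor (a b c d e f g : Int) : pvBump (pvMk a b c d e f g) "indoor" = pvMk a b c d e (f+1) g := by simp [pvBump, pvMk]
lemma pvBump_outdoor (a b c d e f g : Int) : pvBump (pvMk a b c d e f g) "outdoor" = pvMk a b c d e f (g+1) := by simp [pvBump, pvMk]

lemma pvCb_nazi (q : Prop) [Decidable q] (a b c d e f g : Int) :
    (if q then pvBump (pvMk a b c d e f g) "nazi_symbols" else pvMk a b c d e f g)
      = pvMk (a + if q then 1 else 0) b c d e f g := by
  split_ifs <;> simp [pvBump_nazi]
lemma pvCb_jewish (q : Prop) [Decidable q] (a b c d e f g : Int) :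
    (if q then pvBump (pvMk a b c d e f g) "jewish_symbols" else pvMk a b c d e f g)
      = pvMk a (b + if q then 1 else 0) c d e f g := by
  split_ifs <;> simp [pvBump_jewish]
lemma pvCb_hebrew (q : Prop) [Decidable q] (a b c d e f g : Int) :
    (if q then pvBump (pvMk a b c d e f g) "hebrew_text" else pvMk a b c d e f g)
      = pvMk a b (c + if q then 1 else 0) d e f g := by
  split_ifs <;> simp [pvBump_hebrew]
lemma pvCb_german (q : Prop) [Decidable q] (a b c d e f g : Int) :
    (if q then pvBump (pvMk a b c d e f g) "german_text" else pvMk a b c d e f g)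
      = pvMk a b c (d + if q then 1 else 0) e f g := by
  split_ifs <;> simp [pvBump_german]
lemma pvCb_violence (q : Prop) [Decidable q] (a b c d e f g : Int) :
    (if q then pvBump (pvMk a b c d e f g) "violence" else pvMk a b c d e f g)
      = pvMk a b c d (e + if q then 1 else 0) f g := by
  split_ifs <;> simp [pvBump_violence]
lemma pvCb_io (io : String) (a b c d e f g : Int) :
    (if io = "indoor" then pvBump (pvMk a b c d e f g) "indoor"
     else if io = "outdoor" then pvBump (pvMk a b c d e f g) "outdoor"
     else pvMk a b c d e f g)
      = pvMk a b c d e (f + if io = "indoor" then 1 else 0) (g + if io = "outdoor" then 1 else 0) := by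
  split_ifs <;> simp_all [pvBump_indoor, pvBump_outdoor]

lemma pvStepA_mk (row : List (String × String)) (a b c d e f g : Int) :
    pvStepA (pvMk a b c d e f g) row =
      pvMk (a + if (PySem.Str.strip ((row.lookup "llm_nazi_symbols").getD "")) ≠ "" then 1 else 0)
           (b + if (PySem.Str.strip ((row.lookup "llm_jewish_symbols").getD "")) ≠ "" then 1 else 0)
           (c + if PySem.Str.lower ((row.lookup "hebrew_present").getD "") = "true" then 1 else 0)
           (d + if PySem.Str.lower ((row.lookup "german_present").getD "") = "true" then 1 else 0)
           (e + if PySem.Str.lower ((row.lookup "violence").getD "") = "true" then 1 else 0)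
           (f + if PySem.Str.lower ((row.lookup "indoor_outdoor").getD "") = "indoor" then 1 else 0)
           (g + if PySem.Str.lower ((row.lookup "indoor_outdoor").getD "") = "outdoor" then 1 else 0) := by
  simp only [pvStepA]
  rw [pvCb_nazi, pvCb_jewish, pvCb_hebrew, pvCb_german, pvCb_violence, pvCb_io]

lemma pvLoop_mk (l : List (String × List (String × String))) (a b c d e f g : Int) :
    l.foldl (fun counts p => pvStepA counts p.2) (pvMk a b c d e f g) =
      pvMk (a + pvFilled (l.map (·.2)) "llm_nazi_symbols")
           (b + pvFilled (l.map (·.2)) "llm_jewish_symbols")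
           (c + pvFlagged (l.map (·.2)) "hebrew_present")
           (d + pvFlagged (l.map (·.2)) "german_present")
           (e + pvFlagged (l.map (·.2)) "violence")
           (f + ((l.map (·.2)).map (fun r => PySem.Str.lower ((r.lookup "indoor_outdoor").getD ""))).count "indoor")
           (g + ((l.map (·.2)).map (fun r => PySem.Str.lower ((r.lookup "indoor_outdoor").getD ""))).count "outdoor") := by
  induction l generalizing a b c d e f g with
  | nil => simp [pvFilled, pvFlagged]
  | cons hd tl ih =>
      rw [List.foldl_cons, pvStepA_mk, ih]
      simp only [pvMk, pvFilled, pvFlagged, List.map_cons, List.countP_cons, List.count_cons,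
        List.cons.injEq, Prod.mk.injEq, and_true, true_and, beq_iff_eq, decide_eq_true_eq]
      refine ⟨?_, ?_, ?_, ?_, ?_, ?_, ?_⟩ <;> (split_ifs <;> push_cast <;> omega)

-- ===== VERDICT (by name: the statement is the Claim_ definition above) =====
theorem compute_category_counts_spec : Claim_equal_compute_category_counts := by
  intro idx _
  unfold Spec_compute_category_counts compute_category_counts compute_category_counts_alt
  have h := pvLoop_mk idx 0 0 0 0 0 0 0
  simp only [pvMk] at h
  simpa using h
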